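-- pv_equiv track=rewrite | github.com/JanZon00/Puzzle-Generators | shikaku/shikaku_solver.py | find_divisors_for_area
-- ===== SOURCE A (Python) =====
-- def find_divisors_for_area(area, max_height, max_width):
--     possible_rectangles = []
--     for height in range(1, area + 1):
--         if area % height == 0:
--             width = area // height
--             if height <= max_height and width <= max_width:
--                 possible_rectangles.append((height, width))
--             if width < max_height and height <= max_width:
--                 possible_rectangles.append((width, height))
--     return possible_rectangles
-- ===== SOURCE B (Python) =====
-- def find_divisors_for_area(area, max_height, max_width):
--     # Enumerate divisors only up to sqrt(area), then sort: O(sqrt(area)).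
--     divs = []
--     i = 1
--     while i * i <= area:
--         if area % i == 0:
--             divs.append(i)
--             if i != area // i:
--                 divs.append(area // i)
--         i += 1
--     divs.sort()
--     possible_rectangles = []
--     for height in divs:
--         width = area // height
--         if height <= max_height and width <= max_width:
--             possible_rectangles.append((height, width))
--         if width < max_height and height <= max_width:
--             possible_rectangles.append((width, height))
--     return possible_rectangles
-- ===== Notes on version B (the rewrite author's own statement) =====
-- stated objective: faster
-- what changed: B enumerates divisors only up to sqrt(area) (collecting each divisor with its cofactor), sorts them, and emits the rectangle pairs from that sorted divisor list, instead of A's trial division over every height from 1 to area.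
import Mathlib
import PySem

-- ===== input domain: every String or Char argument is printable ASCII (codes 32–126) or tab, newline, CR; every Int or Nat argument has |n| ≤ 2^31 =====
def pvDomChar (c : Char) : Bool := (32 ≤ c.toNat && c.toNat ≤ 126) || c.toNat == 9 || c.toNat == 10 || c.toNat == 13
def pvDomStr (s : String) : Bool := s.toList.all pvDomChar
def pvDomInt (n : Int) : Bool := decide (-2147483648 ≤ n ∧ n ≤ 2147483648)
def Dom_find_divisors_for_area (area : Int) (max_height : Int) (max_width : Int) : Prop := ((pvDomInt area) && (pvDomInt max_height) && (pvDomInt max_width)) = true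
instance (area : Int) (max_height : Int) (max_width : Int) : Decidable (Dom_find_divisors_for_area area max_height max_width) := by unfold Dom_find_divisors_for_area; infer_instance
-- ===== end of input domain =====

-- B replaces A's trial division over every height in 1..area by divisor enumeration up to sqrt(area)
-- followed by a sort of the divisor list: objective 'faster' (asymptotic, O(sqrt(area)) vs O(area)).

-- ===== PORT A =====
def find_divisors_for_area (area : Int) (max_height : Int) (max_width : Int) : List (Int × Int) :=
  (PySem.List.pyRange 1 (area + 1) 1).foldl
    (fun possible_rectangles height =>
      if PySem.Int.mod area height == 0 then
        let width := PySem.Int.floordiv area height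
        let possible_rectangles :=
          if height ≤ max_height ∧ width ≤ max_width then
            possible_rectangles ++ [(height, width)]
          else possible_rectangles
        if width < max_height ∧ height ≤ max_width then
          possible_rectangles ++ [(width, height)]
        else possible_rectangles
      else possible_rectangles) []

-- ===== PORT B =====
-- the while-loop of Source B: collect every divisor i with i*i <= area together with its cofactor area//i
def collectDivs (area : Int) (i : Int) (divs : List Int) : List Int :=
  if _h : i * i ≤ area then
    collectDivs area (i + 1)
      (if PySem.Int.mod area i == 0 then
        divs ++ [i] ++
          (if i ≠ PySem.Int.floordiv area i then [PySem.Int.floordiv area i] else [])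
       else divs)
  else divs
termination_by (area + 1 - i).toNat
decreasing_by
  have h2 : i ≤ area := by nlinarith [mul_self_nonneg (i - 1)]
  omega

def find_divisors_for_area_alt (area : Int) (max_height : Int) (max_width : Int) : List (Int × Int) :=
  (PySem.List.sorted (collectDivs area 1 []) (fun x => x) false).foldl
    (fun possible_rectangles height =>
      let width := PySem.Int.floordiv area height
      let possible_rectangles :=
        if height ≤ max_height ∧ width ≤ max_width then
          possible_rectangles ++ [(height, width)]
        else possible_rectangles
      if width < max_height ∧ height ≤ max_width then
        possible_rectangles ++ [(width, height)]
      else possible_rectangles) []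

-- ===== PRECONDITION & SPEC =====
def Spec_find_divisors_for_area (area : Int) (max_height : Int) (max_width : Int) (out : List (Int × Int)) : Prop := out = find_divisors_for_area_alt area max_height max_width
instance (area : Int) (max_height : Int) (max_width : Int) (out : List (Int × Int)) : Decidable (Spec_find_divisors_for_area area max_height max_width out) := by unfold Spec_find_divisors_for_area; infer_instance

-- ===== CLAIM (what is proved, stated in full; the proofs are below) =====
def Claim_equal_find_divisors_for_area : Prop := ∀ (area : Int) (max_height : Int) (max_width : Int), Dom_find_divisors_for_area area max_height max_width → Spec_find_divisors_for_area area max_height max_width (find_divisors_for_area area max_height max_width)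

-- ===== LEMMAS AND PROOFS =====

-- the divisors of `area` that the collecting loop, entered at step i, has not yet emitted
def pvPred (area i x : Int) : Bool :=
  (PySem.Int.mod area x == 0) && decide (i ≤ x) && decide (i ≤ area / x)

def pvRem (area i : Int) : List Int :=
  (PySem.List.pyRange 1 (area + 1) 1).filter (pvPred area i)

lemma pv_dvd_facts {area x : Int} (hx : 0 < x) (hd : PySem.Int.mod area x = 0) :
    x * (area / x) = area := by
  exact Int.mul_ediv_cancel' ((PySem.Int.mod_eq_zero_iff_dvd area x).1 hd)

-- past sqrt(area): nothing remains
lemma pvRem_stop {area i : Int} (hi : 1 ≤ i) (h : ¬ i * i ≤ area) : pvRem area i = [] := by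
  refine List.filter_eq_nil_iff.2 ?_
  intro x hx hp
  rcases PySem.List.mem_pyRange_one.1 hx with ⟨hx1, _⟩
  simp only [pvPred, Bool.and_eq_true, beq_iff_eq, decide_eq_true_eq] at hp
  rcases hp with ⟨⟨hd, hix⟩, hiq⟩
  have hmul := pv_dvd_facts (by omega : (0:Int) < x) hd
  have : i * i ≤ x * (area / x) :=
    mul_le_mul hix hiq (by omega) (by omega)
  omega

-- i is not a divisor: the remaining set is unchanged
lemma pvRem_skip {area i : Int} (hi : 1 ≤ i) (hd : ¬ PySem.Int.mod area i = 0) :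
    pvRem area i = pvRem area (i + 1) := by
  refine List.filter_congr ?_
  intro x hx
  rcases PySem.List.mem_pyRange_one.1 hx with ⟨hx1, hx2⟩
  by_cases hdx : PySem.Int.mod area x = 0
  · have hmul := pv_dvd_facts (by omega : (0:Int) < x) hdx
    have hxi : x ≠ i := by rintro rfl; exact hd hdx
    have hqi : area / x ≠ i := by
      intro hq
      apply hd
      rw [PySem.Int.mod_eq_zero_iff_dvd]
      exact ⟨x, by rw [← hmul, hq, mul_comm]⟩
    simp only [pvPred, hdx, beq_self_eq_true, Bool.true_and]
    rw [Bool.eq_iff_iff]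
    simp only [Bool.and_eq_true, decide_eq_true_eq]
    generalize area / x = d at hqi ⊢
    omega
  · have hf : (PySem.Int.mod area x == 0) = false := by simpa using hdx
    simp [pvPred, hf]

-- i is a divisor: the remaining set splits off i and its cofactor
lemma pvRem_step {area i : Int} (hi : 1 ≤ i) (hii : i * i ≤ area)
    (hd : PySem.Int.mod area i = 0) :
    List.Perm (pvRem area i)
      (([i] ++ (if i ≠ area / i then [area / i] else [])) ++ pvRem area (i + 1)) := by
  have hmul := pv_dvd_facts (by omega : (0:Int) < i) hd
  have hq1 : i ≤ area / i := by rw [Int.le_ediv_iff_mul_le (by omega)]; exact hii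
  set q := area / i with hqdef
  have hiarea : i ≤ area := by nlinarith
  have hqarea : q ≤ area := by
    nlinarith [mul_nonneg (by omega : (0:Int) ≤ i - 1) (by omega : (0:Int) ≤ q)]
  have hdivq : area / q = i := by
    conv_lhs => rw [← hmul, mul_comm i q]
    exact Int.mul_ediv_cancel_left i (by omega)
  have hdq : PySem.Int.mod area q = 0 := by
    rw [PySem.Int.mod_eq_zero_iff_dvd]
    exact ⟨i, by rw [← hmul, mul_comm]⟩
  have hnodup := (PySem.List.nodup_pyRange_one 1 (area + 1)).filter (pvPred area i)
  rw [List.perm_iff_count]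
  intro y
  rw [List.count_append]
  have hcount : ∀ (j : Int), (pvRem area j).count y
      = if y ∈ PySem.List.pyRange 1 (area + 1) ∧ pvPred area j y then 1 else 0 := by
    intro j
    by_cases hmem : y ∈ PySem.List.pyRange 1 (area + 1)
    · by_cases hp : pvPred area j y
      · simp only [hmem, hp, and_self, if_true]
        exact List.count_eq_one_of_mem
          ((PySem.List.nodup_pyRange_one 1 (area + 1)).filter _)
          (List.mem_filter.2 ⟨hmem, hp⟩)
      · simp only [hmem, hp, and_false, if_false]
        exact List.count_eq_zero_of_not_mem (fun hc => hp (List.mem_filter.1 hc).2)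
    · simp only [hmem, false_and, if_false]
      exact List.count_eq_zero_of_not_mem (fun hc => hmem (List.mem_filter.1 hc).1)
  rw [hcount, hcount]
  by_cases hyi : y = i
  · subst hyi
    have hp : pvPred area y y = true := by
      simp only [pvPred, hd, Bool.and_eq_true, beq_self_eq_true, decide_eq_true_eq]
      exact ⟨⟨trivial, le_refl _⟩, hq1⟩
    have hp' : pvPred area (y + 1) y = false := by
      simp only [pvPred, Bool.and_eq_true, decide_eq_true_eq, Bool.and_eq_false_iff]
      left; right; simp only [decide_eq_false_iff_not]; omega
    have hmem : y ∈ PySem.List.pyRange 1 (area + 1) :=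
      PySem.List.mem_pyRange_one.2 ⟨hi, by omega⟩
    simp only [hmem, hp, hp', and_true, and_false, true_and, if_true, if_false]
    by_cases hqq : y ≠ q
    · rw [if_pos hqq]
      have hcq : List.count y [q] = 0 := by rw [List.count_eq_zero]; simp [hqq]
      simp [List.count_append, hcq]
    · rw [if_neg hqq]
      simp
  · by_cases hyq : y = q
    · -- y is the cofactor (and ≠ i)
      have hne : i ≠ q := fun h => hyi (by omega)
      subst hyq
      have hp : pvPred area i q = true := by
        simp only [pvPred, hdq, Bool.and_eq_true, beq_self_eq_true, decide_eq_true_eq, hdivq]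
        exact ⟨⟨trivial, hq1⟩, by omega⟩
      have hp' : pvPred area (i + 1) q = false := by
        simp only [pvPred, hdivq, Bool.and_eq_false_iff]
        right; simp only [decide_eq_false_iff_not]; omega
      have hmem : q ∈ PySem.List.pyRange 1 (area + 1) :=
        PySem.List.mem_pyRange_one.2 ⟨by omega, by omega⟩
      simp only [hmem, hp, hp', and_true, and_false, true_and, if_true, if_false, hne,
        ite_true, if_true]
      simp [List.count_cons, Ne.symm hyi]
    · -- y is neither i nor the cofactor: its membership is unchanged
      have hcontrib : List.count y ([i] ++ (if i ≠ q then [q] else [])) = 0 := by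
        rw [List.count_eq_zero]
        intro hmem
        rcases List.mem_append.1 hmem with h | h
        · exact hyi (by simpa using h)
        · by_cases hqq : i ≠ q
          · rw [if_pos hqq] at h; exact hyq (by simpa using h)
          · rw [if_neg hqq] at h; simp at h
      rw [hcontrib]
      have hpeq : pvPred area i y = pvPred area (i + 1) y := by
        by_cases hdx : PySem.Int.mod area y = 0
        · by_cases hy1 : 0 < y
          · have hmul2 := pv_dvd_facts hy1 hdx
            have hqy : area / y ≠ i := by
              intro hqe
              apply hyq
              have harea : area = y * i := by rw [← hmul2, hqe]
              rw [hqdef, harea, Int.mul_ediv_cancel _ (by omega : i ≠ 0)]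
            simp only [pvPred, hdx, beq_self_eq_true, Bool.true_and]
            rw [Bool.eq_iff_iff]
            simp only [Bool.and_eq_true, decide_eq_true_eq]
            generalize area / y = d at hqy ⊢
            constructor
            · rintro ⟨h1, h2⟩; exact ⟨by omega, by omega⟩
            · rintro ⟨h1, h2⟩; exact ⟨by omega, by omega⟩
          · simp only [pvPred, hdx, beq_self_eq_true, Bool.true_and]
            rw [Bool.eq_iff_iff]
            simp only [Bool.and_eq_true, decide_eq_true_eq]
            constructor
            · rintro ⟨h1, _⟩; omega
            · rintro ⟨h1, _⟩; omega
        · simp only [pvPred]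
          have : (PySem.Int.mod area y == 0) = false := by simpa using hdx
          simp [this]
      rw [hpeq, zero_add]

lemma collect_inv (area : Int) : ∀ (n : ℕ) (i : Int) (acc : List Int),
    (area + 1 - i).toNat = n → 1 ≤ i →
    List.Perm (collectDivs area i acc) (acc ++ pvRem area i) := by
  intro n
  induction n using Nat.strong_induction_on with
  | _ n IH =>
    intro i acc hn hi
    rw [collectDivs]
    by_cases h : i * i ≤ area
    · simp only [h, dif_pos]
      have hiarea : i ≤ area := by nlinarith
      have hrec := fun acc' => IH ((area + 1 - (i + 1)).toNat) (by omega) (i + 1) acc' rfl (by omega)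
      by_cases hd : PySem.Int.mod area i = 0
      · have hd' : (PySem.Int.mod area i == 0) = true := by simpa using hd
        rw [if_pos hd']
        refine (hrec _).trans ?_
        have hfd : PySem.Int.floordiv area i = area / i :=
          PySem.Int.floordiv_eq_ediv_of_pos (by omega)
        rw [hfd]
        have hstep := (pvRem_step hi h hd).symm
        have : List.Perm
            (acc ++ (([i] ++ (if i ≠ area / i then [area / i] else [])) ++ pvRem area (i + 1)))
            (acc ++ pvRem area i) := List.Perm.append_left acc hstep
        simpa [List.append_assoc] using this
      · have hd' : (PySem.Int.mod area i == 0) = false := by simpa using hd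
        rw [if_neg (by simp [hd'])]
        refine (hrec _).trans ?_
        rw [pvRem_skip hi hd]
    · simp only [h, dif_neg, not_false_iff]
      rw [pvRem_stop hi h]
      simp

-- at step 1 the remaining set is exactly the divisors in range(1, area+1)
lemma pvRem_one (area : Int) :
    pvRem area 1 = (PySem.List.pyRange 1 (area + 1) 1).filter
      (fun x => PySem.Int.mod area x == 0) := by
  refine List.filter_congr ?_
  intro x hx
  rcases PySem.List.mem_pyRange_one.1 hx with ⟨hx1, hx2⟩
  by_cases hdx : PySem.Int.mod area x = 0
  · have hmul := pv_dvd_facts (by omega : (0:Int) < x) hdx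
    have hq1 : 1 ≤ area / x := by
      rw [Int.le_ediv_iff_mul_le (by omega)]; omega
    simp only [pvPred, hdx, beq_self_eq_true, Bool.true_and, Bool.and_eq_true,
      decide_eq_true_eq]
    simp [hx1, hq1]
  · have : (PySem.Int.mod area x == 0) = false := by simpa using hdx
    simp [pvPred, this]

lemma sorted_collect (area : Int) :
    PySem.List.sorted (collectDivs area 1 []) (fun x => x) false
      = (PySem.List.pyRange 1 (area + 1) 1).filter (fun x => PySem.Int.mod area x == 0) := by
  apply PySem.List.sorted_eq_of_perm_of_pairwise_lt
  · refine List.Perm.symm ?_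
    have := collect_inv area ((area + 1 - 1).toNat) 1 [] rfl (le_refl 1)
    simpa [pvRem_one] using this
  · exact (PySem.List.pairwise_lt_pyRange_one 1 (area + 1)).filter _

-- ===== VERDICT (by name: the statement is the Claim_ definition above) =====
theorem find_divisors_for_area_spec : Claim_equal_find_divisors_for_area := by
  intro area max_height max_width _
  unfold Spec_find_divisors_for_area find_divisors_for_area find_divisors_for_area_alt
  rw [PySem.List.foldl_if_eq_foldl_filter (fun height => PySem.Int.mod area height == 0)]
  rw [sorted_collect]
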